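-- pv_equiv track=rewrite | github.com/EvoClaw-Bench/EvoClaw | harness/test_runner/core/merger.py | is_flaky
-- ===== SOURCE A (Python) =====
-- from typing import List, Dict, Any, Optional, Set
--
-- def is_flaky(outcomes: List[str]) -> bool:
--     """
--     Check if a test is flaky based on its outcomes across multiple attempts.
--
--     A test is considered flaky if its outcomes are not consistent across attempts.
--
--     Args:
--         outcomes: List of outcomes from multiple attempts
--
--     Returns:
--         True if the test is flaky (inconsistent outcomes), False otherwise
--     """
--     if len(outcomes) <= 1:
--         return False
--     # Normalize outcomes: treat 'error' as 'failed' for flaky detection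
--     normalized = []
--     for o in outcomes:
--         if o in ["failed", "error"]:
--             normalized.append("failed")
--         else:
--             normalized.append(o)
--     return len(set(normalized)) > 1
-- ===== SOURCE B (Python) =====
-- def is_flaky(outcomes):
--     """
--     Check if a test is flaky based on its outcomes across multiple attempts.
--
--     A test is considered flaky if its outcomes are not consistent across attempts.
--     Keeps a single normalized reference value from the first outcome and compares
--     every later outcome against it, returning True at the first mismatch.
--     """
--     if not outcomes:
--         return False
--     ref = "failed" if outcomes[0] in ("failed", "error") else outcomes[0]
--     for o in outcomes[1:]:
--         n = "failed" if o in ("failed", "error") else o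
--         if n != ref:
--             return True
--     return False
-- ===== Notes on version B (the rewrite author's own statement) =====
-- stated objective: simpler
-- what changed: Instead of building a normalized list and a set of its distinct values, B normalizes the first outcome into one reference string and scans the rest, returning True at the first normalized mismatch; no list or set is allocated.
import Mathlib
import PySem

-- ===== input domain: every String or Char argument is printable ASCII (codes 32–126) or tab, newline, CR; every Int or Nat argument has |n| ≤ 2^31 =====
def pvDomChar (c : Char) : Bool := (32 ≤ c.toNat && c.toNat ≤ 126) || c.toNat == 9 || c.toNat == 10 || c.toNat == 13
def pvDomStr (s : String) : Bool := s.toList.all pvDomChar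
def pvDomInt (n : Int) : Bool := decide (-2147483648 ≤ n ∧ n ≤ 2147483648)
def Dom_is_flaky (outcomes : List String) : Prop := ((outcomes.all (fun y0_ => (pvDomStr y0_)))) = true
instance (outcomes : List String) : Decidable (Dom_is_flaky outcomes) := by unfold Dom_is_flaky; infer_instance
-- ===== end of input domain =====

-- B replaces A's normalized list + set-of-distinct-values with a single normalized
-- reference string compared against each later outcome (simpler, no allocation).


-- ===== PORT A =====
def is_flaky (outcomes : List String) : Bool :=
  if outcomes.length ≤ 1 then false
  else
    let normalized := outcomes.foldl
      (fun acc o => acc ++ [if o = "failed" ∨ o = "error" then "failed" else o]) []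
    decide (1 < (PySem.Set.ofList normalized).length)

-- ===== PORT B =====
def is_flaky_norm (o : String) : String :=
  if o = "failed" ∨ o = "error" then "failed" else o

def is_flaky_alt (outcomes : List String) : Bool :=
  match outcomes with
  | [] => false
  | o :: rest =>
    let ref := is_flaky_norm o
    rest.any (fun x => is_flaky_norm x ≠ ref)

-- ===== PRECONDITION & SPEC =====
def Spec_is_flaky (outcomes : List String) (out : Bool) : Prop := out = is_flaky_alt outcomes
instance (outcomes : List String) (out : Bool) : Decidable (Spec_is_flaky outcomes out) := by unfold Spec_is_flaky; infer_instance

-- ===== CLAIM (what is proved, stated in full; the proofs are below) =====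
def Claim_equal_is_flaky : Prop := ∀ (outcomes : List String), Dom_is_flaky outcomes → Spec_is_flaky outcomes (is_flaky outcomes)

-- ===== LEMMAS AND PROOFS =====

theorem foldl_append_norm (l : List String) (acc : List String) :
    l.foldl (fun acc o => acc ++ [if o = "failed" ∨ o = "error" then "failed" else o]) acc
      = acc ++ l.map is_flaky_norm := by
  induction l generalizing acc with
  | nil => simp
  | cons x l ih => simp [List.foldl, ih, is_flaky_norm]

theorem len_le_foldl_add (l : List String) (s : PySem.Set String) :
    s.length ≤ (l.foldl PySem.Set.add s).length := by
  induction l generalizing s with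
  | nil => simp
  | cons x l ih =>
    refine le_trans ?_ (ih (PySem.Set.add s x))
    simp [PySem.Set.add]
    split <;> simp

theorem set_card_gt_one (l : List String) (a : String) :
    decide (1 < (l.foldl PySem.Set.add [a]).length) = l.any (fun x => x ≠ a) := by
  induction l with
  | nil => simp
  | cons x l ih =>
    by_cases hx : x = a
    · subst hx
      simpa [List.foldl, PySem.Set.add, PySem.Set.contains] using ih
    · have hadd : PySem.Set.add [a] x = [a, x] := by
        simp [PySem.Set.add, PySem.Set.contains, hx]
      have hlen := len_le_foldl_add l [a, x]
      have h3 : 1 < (l.foldl PySem.Set.add [a, x]).length := by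
        simp at hlen; omega
      simp [List.foldl, hadd, h3, hx]

theorem ofList_cons_foldl (b : String) (t : List String) :
    PySem.Set.ofList (b :: t) = t.foldl PySem.Set.add [b] := by
  simp [PySem.Set.ofList_eq_foldl, List.foldl, PySem.Set.add]

theorem is_flaky_spec : Claim_equal_is_flaky := by
  intro outcomes _
  unfold Spec_is_flaky is_flaky is_flaky_alt
  match outcomes with
  | [] => simp
  | [o] => simp
  | o :: x :: rest =>
    rw [foldl_append_norm]
    simp only [List.nil_append, List.map_cons]
    rw [if_neg (by simp)]
    simp only [ofList_cons_foldl, set_card_gt_one]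
    simp [List.any_map, Function.comp_def]
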